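-- pv_equiv track=rewrite | github.com/epolepole/FizzBuzz | py_solutions/Algorithms/chainable.py | chainable
-- ===== SOURCE A (Python) =====
-- from collections import deque
--
-- def followed(a, b):
--     return a % 100 == b // 100
--
-- def chainable(set_of_nums, A, B):
--     to_check = deque([A])
--
--     while len(to_check) != 0:
--         check = to_check.pop()
--         set_of_nums.discard(check)
--         if followed(check, B):
--             return True
--         for num in set_of_nums:
--             if followed(check, num):
--                 to_check.append(num)
--
--     return False
-- ===== SOURCE B (Python) =====
-- def chainable(set_of_nums, A, B):
--     # Index the numbers by their two leading digits (num // 100) once, then run a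
--     # depth-first search over that index with a visited set, instead of rescanning
--     # the whole set at every pop.  Return value only: unlike A, this does not
--     # mutate set_of_nums.
--     target = B // 100
--     index = {}
--     for num in set_of_nums:
--         index.setdefault(num // 100, []).append(num)
--     visited = set()
--     stack = [A]
--     while stack:
--         x = stack.pop()
--         suffix = x % 100
--         if suffix == target:
--             return True
--         for y in index.get(suffix, []):
--             if y not in visited:
--                 visited.add(y)
--                 stack.append(y)
--     return False
-- ===== Notes on version B (the rewrite author's own statement) =====
-- stated objective: faster
-- what changed: B builds a dict indexing the numbers by their leading digits (num // 100) once and runs a DFS with a visited set over that index, instead of A's worklist that rescans the entire shrinking set on every pop (which can also re-enqueue the same number many times).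
import Mathlib
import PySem

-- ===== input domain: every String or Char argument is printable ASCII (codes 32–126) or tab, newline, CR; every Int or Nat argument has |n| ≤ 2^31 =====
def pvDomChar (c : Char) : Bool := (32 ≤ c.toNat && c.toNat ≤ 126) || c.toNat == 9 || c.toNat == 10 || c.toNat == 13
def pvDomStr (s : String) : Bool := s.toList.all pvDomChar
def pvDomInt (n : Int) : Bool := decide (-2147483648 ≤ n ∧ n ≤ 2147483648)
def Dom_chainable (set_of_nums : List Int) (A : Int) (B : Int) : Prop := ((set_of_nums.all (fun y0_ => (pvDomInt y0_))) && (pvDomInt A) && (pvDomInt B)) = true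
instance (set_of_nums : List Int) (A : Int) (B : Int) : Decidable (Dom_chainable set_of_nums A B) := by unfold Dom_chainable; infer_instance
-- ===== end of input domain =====

-- B replaces A's rescan of the whole (shrinking) set at every pop by a prefix index (num//100)
-- built once plus a visited-set DFS; return value only: A mutates set_of_nums (discard), B does not.

-- ===== PORT A =====
def followed (a b : Int) : Bool := PySem.Int.mod a 100 == PySem.Int.floordiv b 100

-- Termination scaffolding for A's while-loop (the loop always terminates): each queue entry
-- carries, as a ghost Nat, an upper bound related to the set's size when it was appended;
-- `chainInv` is the invariant relating those ghosts to the current set, `chainMeasure` the measure.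
def chainInv (s : List Int) (q : List (Int × Nat)) : Prop :=
  ∀ p ∈ q, s.length ≤ p.2 ∧ (p.1 ∉ s → s.length < p.2)

def chainMeasure (s : List Int) (q : List (Int × Nat)) : Nat :=
  (q.map (fun p => (s.length + 2) ^ p.2)).sum

theorem chain_step_bound (s : List Int) (check : Int) (b : Nat)
    (hb : s.length ≤ b ∧ (check ∉ s → s.length < b)) :
    (PySem.Set.discard s check).length + 1 ≤ b ∧ (PySem.Set.discard s check).length ≤ s.length := by
  unfold PySem.Set.discard
  refine ⟨?_, List.length_filter_le _ _⟩
  by_cases hc : check ∈ s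
  · have hlt : (List.filter (fun y => !y == check) s).length < s.length := by
      rw [List.length_filter_lt_length_iff_exists]
      exact ⟨check, hc, by simp⟩
    omega
  · have heq : List.filter (fun y => !y == check) s = s := by
      rw [List.filter_eq_self]
      intro y hy
      simp only [Bool.not_eq_eq_eq_not, Bool.not_true, beq_eq_false_iff_ne, ne_eq]
      rintro rfl
      exact hc hy
    rw [heq]
    have := hb.2 hc
    omega

theorem chain_step_inv (s : List Int) (check : Int) (b : Nat) (rest : List (Int × Nat))
    (hinv : chainInv s ((check, b) :: rest)) :
    chainInv (PySem.Set.discard s check)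
      ((((PySem.Set.discard s check).filter (fun y => followed check y)).map
          (fun y => (y, (PySem.Set.discard s check).length))).reverse ++ rest) := by
  intro p hp
  rcases List.mem_append.mp hp with hp | hp
  · rw [List.mem_reverse] at hp
    rcases List.mem_map.mp hp with ⟨y, hy, rfl⟩
    have hy' := List.mem_filter.mp hy
    exact ⟨le_refl _, fun h => absurd hy'.1 h⟩
  · have h := hinv p (List.mem_cons_of_mem _ hp)
    have hlen : (PySem.Set.discard s check).length ≤ s.length :=
      List.length_filter_le _ _
    refine ⟨le_trans hlen h.1, fun hns => ?_⟩
    by_cases hmem : p.1 ∈ s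
    · -- p.1 ∈ s but p.1 ∉ discard s check: p.1 = check, so check ∈ s and discard shrinks
      have hpc : p.1 = check := by
        by_contra hne
        exact hns ((PySem.Set.mem_discard s check p.1).mpr ⟨hmem, hne⟩)
      have hlt : (PySem.Set.discard s check).length < s.length := by
        unfold PySem.Set.discard
        rw [List.length_filter_lt_length_iff_exists]
        exact ⟨check, hpc ▸ hmem, by simp⟩
      omega
    · have := h.2 hmem
      omega

theorem chain_step_lt (s : List Int) (check : Int) (b : Nat) (rest : List (Int × Nat))
    (hinv : chainInv s ((check, b) :: rest)) :
    chainMeasure (PySem.Set.discard s check)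
      ((((PySem.Set.discard s check).filter (fun y => followed check y)).map
          (fun y => (y, (PySem.Set.discard s check).length))).reverse ++ rest)
      < chainMeasure s ((check, b) :: rest) := by
  have hb := hinv (check, b) List.mem_cons_self
  obtain ⟨hb1, hle⟩ := chain_step_bound s check b hb
  set s' := PySem.Set.discard s check with hs'
  unfold chainMeasure
  rw [List.map_append, List.sum_append, List.map_cons, List.sum_cons]
  show ((((s'.filter (fun y => followed check y)).map (fun y => (y, s'.length))).reverse).map
        (fun p => (s'.length + 2) ^ p.2)).sum
      + (rest.map (fun p => (s'.length + 2) ^ p.2)).sum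
    < (s.length + 2) ^ b + (rest.map (fun p => (s.length + 2) ^ p.2)).sum
  have happ :
      ((((s'.filter (fun y => followed check y)).map (fun y => (y, s'.length))).reverse).map
        (fun p => (s'.length + 2) ^ p.2)).sum
      = (s'.filter (fun y => followed check y)).length * (s'.length + 2) ^ s'.length := by
    rw [List.map_reverse, List.sum_reverse, List.map_map]
    have hcomp : ((fun p : Int × Nat => (s'.length + 2) ^ p.2) ∘ fun y : Int => (y, s'.length))
        = fun _ : Int => (s'.length + 2) ^ s'.length := rfl
    rw [hcomp, List.map_const', List.sum_replicate, smul_eq_mul]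
  rw [happ]
  have hrest :
      (rest.map (fun p => (s'.length + 2) ^ p.2)).sum
        ≤ (rest.map (fun p => (s.length + 2) ^ p.2)).sum := by
    apply List.sum_le_sum
    intro p _
    exact Nat.pow_le_pow_left (by omega) _
  have hk : (s'.filter (fun y => followed check y)).length < s'.length + 2 := by
    have := List.length_filter_le (fun y => followed check y) s'
    omega
  have hmain : (s'.filter (fun y => followed check y)).length * (s'.length + 2) ^ s'.length
      < (s.length + 2) ^ b := by
    calc (s'.filter (fun y => followed check y)).length * (s'.length + 2) ^ s'.length
        < (s'.length + 2) * (s'.length + 2) ^ s'.length :=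
          Nat.mul_lt_mul_of_pos_right hk (Nat.pow_pos (by omega))
      _ = (s'.length + 2) ^ (s'.length + 1) := by ring
      _ ≤ (s.length + 2) ^ (s'.length + 1) := Nat.pow_le_pow_left (by omega) _
      _ ≤ (s.length + 2) ^ b := Nat.pow_le_pow_right (by omega) (by omega)
  exact add_lt_add_of_lt_of_le hmain hrest

def chainLoop (B : Int) (s : List Int) (q : List (Int × Nat)) (hinv : chainInv s q) : Bool :=
  match q, hinv with
  | [], _ => false
  | (check, b) :: rest, hinv =>
    -- check = to_check.pop(); set_of_nums.discard(check)
    let s' := PySem.Set.discard s check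
    if followed check B then true
    else
      -- for num in set_of_nums: if followed(check, num): to_check.append(num)
      chainLoop B s'
        (((s'.filter (fun y => followed check y)).map (fun y => (y, s'.length))).reverse ++ rest)
        (chain_step_inv s check b rest hinv)
termination_by chainMeasure s q
decreasing_by exact chain_step_lt s check b rest hinv

def chainable (set_of_nums : List Int) (A : Int) (B : Int) : Bool :=
  let s := PySem.Set.ofList set_of_nums
  chainLoop B s [(A, s.length + 1)]
    (by intro p hp; simp only [List.mem_singleton] at hp; subst hp; exact ⟨by omega, fun _ => by omega⟩)

-- ===== PORT B =====
-- index.setdefault(num // 100, []).append(num) over the set's elements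
def buildIndex (nums : List Int) : PySem.Dict Int (List Int) :=
  nums.foldl (fun d num => d.modify (PySem.Int.floordiv num 100) [] (fun t => t ++ [num]))
    PySem.Dict.empty

-- the inner for-loop: push each not-yet-visited bucket element, marking it visited
def pushAll (bucket : List Int) (visited : PySem.Set Int) (stack : List Int) :
    PySem.Set Int × List Int :=
  match bucket with
  | [] => (visited, stack)
  | y :: ys =>
    if PySem.Set.contains visited y then pushAll ys visited stack
    else pushAll ys (PySem.Set.add visited y) (y :: stack)

-- number of not-yet-visited elements (termination measure component)
def unvis (nums : List Int) (v : PySem.Set Int) : Nat :=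
  (nums.filter (fun y => !PySem.Set.contains v y)).length

theorem unvis_add_lt (nums : List Int) (v : PySem.Set Int) (y : Int)
    (hy : y ∈ nums) (hv : PySem.Set.contains v y = false) :
    unvis nums (PySem.Set.add v y) < unvis nums v := by
  unfold unvis
  have hsub : ∀ z : Int, (!PySem.Set.contains (PySem.Set.add v y) z) = true →
      (!PySem.Set.contains v z) = true := by
    intro z hz
    simp only [Bool.not_eq_eq_eq_not, Bool.not_true, PySem.Set.contains_eq_listContains,
      List.contains_eq_mem, decide_eq_false_iff_not] at *
    exact fun h => hz ((PySem.Set.mem_add v y z).mpr (Or.inl h))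
  have hfe : nums.filter (fun z => !PySem.Set.contains (PySem.Set.add v y) z)
      = (nums.filter (fun z => !PySem.Set.contains v z)).filter
          (fun z => !PySem.Set.contains (PySem.Set.add v y) z) := by
    rw [List.filter_filter]
    apply List.filter_congr
    intro z _
    by_cases hzy : z = y
    · subst hzy
      simp [PySem.Set.contains_eq_listContains, List.contains_eq_mem, PySem.Set.mem_add]
    · by_cases hzv : z ∈ v
      · simp [PySem.Set.contains_eq_listContains, List.contains_eq_mem, PySem.Set.mem_add,
          hzv, hzy]
      · simp [PySem.Set.contains_eq_listContains, List.contains_eq_mem, PySem.Set.mem_add,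
          hzv, hzy]
  rw [hfe]
  rw [List.length_filter_lt_length_iff_exists]
  have hv' : y ∉ v := by simpa using hv
  refine ⟨y, ?_, ?_⟩
  · rw [List.mem_filter]
    exact ⟨hy, by simp [hv']⟩
  · intro hcon
    have hmem : y ∈ PySem.Set.add v y := (PySem.Set.mem_add v y y).mpr (Or.inr rfl)
    simp only [Bool.not_eq_eq_eq_not, Bool.not_true, PySem.Set.contains_eq_listContains,
      List.contains_eq_mem, decide_eq_false_iff_not] at hcon
    exact hcon hmem

theorem pushAll_measure (nums : List Int) :
    ∀ (bucket : List Int) (v : PySem.Set Int) (st : List Int),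
    (∀ y ∈ bucket, y ∈ nums) →
    (pushAll bucket v st).2.length + 2 * unvis nums (pushAll bucket v st).1
      ≤ st.length + 2 * unvis nums v := by
  intro bucket
  induction bucket with
  | nil => intro v st _; simp [pushAll]
  | cons y ys ih =>
    intro v st hsub
    unfold pushAll
    by_cases hc : PySem.Set.contains v y = true
    · simp only [hc, if_true]
      exact ih v st (fun z hz => hsub z (List.mem_cons_of_mem _ hz))
    · simp only [Bool.not_eq_true] at hc
      simp only [hc, Bool.false_eq_true, if_false]
      have h1 := ih (PySem.Set.add v y) (y :: st) (fun z hz => hsub z (List.mem_cons_of_mem _ hz))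
      have h2 := unvis_add_lt nums v y (hsub y List.mem_cons_self) hc
      simp only [List.length_cons] at h1
      omega

def altLoop (target : Int) (index : PySem.Dict Int (List Int)) (nums : List Int)
    (hidx : ∀ k : Int, ∀ y ∈ index.getD k [], y ∈ nums)
    (v : PySem.Set Int) (st : List Int) : Bool :=
  match st with
  | [] => false
  | x :: rest =>
    if PySem.Int.mod x 100 == target then true
    else
      let p := pushAll (index.getD (PySem.Int.mod x 100) []) v rest
      altLoop target index nums hidx p.1 p.2
termination_by st.length + 2 * unvis nums v
decreasing_by
  have := pushAll_measure nums (index.getD (PySem.Int.mod x 100) []) v rest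
    (hidx (PySem.Int.mod x 100))
  simp only [List.length_cons]
  omega

theorem getD_buildIndex_aux :
    ∀ (l : List Int) (d : PySem.Dict Int (List Int)) (c : Int),
    (l.foldl (fun d num => d.modify (PySem.Int.floordiv num 100) [] (fun t => t ++ [num])) d).getD c []
      = d.getD c [] ++ l.filter (fun num => PySem.Int.floordiv num 100 == c) := by
  intro l
  induction l with
  | nil => intro d c; simp
  | cons y ys ih =>
    intro d c
    simp only [List.foldl_cons, List.filter_cons]
    rw [ih, PySem.Dict.getD_modify]
    by_cases h : c = PySem.Int.floordiv y 100
    · subst h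
      rw [if_pos rfl, if_pos (by simp)]
      simp [List.append_assoc]
    · have h' : (PySem.Int.floordiv y 100 == c) = false := by
        simp only [beq_eq_false_iff_ne, ne_eq]
        exact fun hh => h hh.symm
      rw [if_neg h, h']
      simp

theorem getD_buildIndex (nums : List Int) (c : Int) :
    (buildIndex nums).getD c [] = nums.filter (fun num => PySem.Int.floordiv num 100 == c) := by
  unfold buildIndex
  rw [getD_buildIndex_aux]
  simp

def chainable_alt (set_of_nums : List Int) (A : Int) (B : Int) : Bool :=
  let target := PySem.Int.floordiv B 100
  let nums := PySem.Set.ofList set_of_nums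
  let index := buildIndex nums
  altLoop target index nums
    (by intro k y hy; rw [getD_buildIndex] at hy; exact (List.mem_filter.mp hy).1)
    PySem.Set.empty [A]

-- ===== PRECONDITION & SPEC =====
def Spec_chainable (set_of_nums : List Int) (A : Int) (B : Int) (out : Bool) : Prop := out = chainable_alt set_of_nums A B
instance (set_of_nums : List Int) (A : Int) (B : Int) (out : Bool) : Decidable (Spec_chainable set_of_nums A B out) := by unfold Spec_chainable; infer_instance

-- ===== CLAIM (what is proved, stated in full; the proofs are below) =====
def Claim_equal_chainable : Prop := ∀ (set_of_nums : List Int) (A : Int) (B : Int), Dom_chainable set_of_nums A B → Spec_chainable set_of_nums A B (chainable set_of_nums A B)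

-- ===== LEMMAS AND PROOFS =====

-- reachability from some element of `init` through elements of `s`
inductive ReachL (s : List Int) (init : List Int) : Int → Prop
  | base (x : Int) : x ∈ init → ReachL s init x
  | step (x y : Int) : ReachL s init x → y ∈ s → followed x y = true → ReachL s init y

theorem reachL_nil (s : List Int) (x : Int) : ¬ ReachL s [] x := by
  intro h
  induction h with
  | base z hz => exact absurd hz (List.not_mem_nil)
  | step _ _ _ _ _ ih => exact ih


-- A-side step: after popping `check`, reachability from the new queue equals (minus `check`
-- itself) reachability from the old queue.
theorem reachA_fwd (s : List Int) (check : Int) (restv : List Int) (x : Int)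
    (h : ReachL (PySem.Set.discard s check)
      (((PySem.Set.discard s check).filter (fun y => followed check y)).reverse ++ restv) x) :
    ReachL s (check :: restv) x := by
  induction h with
  | base z hz =>
    rcases List.mem_append.mp hz with hz | hz
    · rw [List.mem_reverse] at hz
      have hz' := List.mem_filter.mp hz
      have hzs : z ∈ s := ((PySem.Set.mem_discard s check z).mp hz'.1).1
      exact .step check z (.base check List.mem_cons_self) hzs hz'.2
    · exact .base z (List.mem_cons_of_mem _ hz)
  | step a y _ hy hf ih =>
    exact .step a y ih ((PySem.Set.mem_discard s check y).mp hy).1 hf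

theorem reachA_bwd (s : List Int) (check : Int) (restv : List Int) (x : Int)
    (h : ReachL s (check :: restv) x) :
    x = check ∨ ReachL (PySem.Set.discard s check)
      (((PySem.Set.discard s check).filter (fun y => followed check y)).reverse ++ restv) x := by
  induction h with
  | base z hz =>
    rcases List.mem_cons.mp hz with hz | hz
    · exact Or.inl hz
    · exact Or.inr (.base z (List.mem_append.mpr (Or.inr hz)))
  | step a y ha hy hf ih =>
    by_cases hyc : y = check
    · exact Or.inl hyc
    · right
      have hy' : y ∈ PySem.Set.discard s check := (PySem.Set.mem_discard s check y).mpr ⟨hy, hyc⟩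
      rcases ih with rfl | hra
      · exact .base y (List.mem_append.mpr (Or.inl (List.mem_reverse.mpr
          (List.mem_filter.mpr ⟨hy', hf⟩))))
      · exact .step a y hra hy' hf

theorem chainLoop_iff (B : Int) :
    ∀ (n : Nat) (s : List Int) (q : List (Int × Nat)) (hinv : chainInv s q),
    chainMeasure s q < n →
    (chainLoop B s q hinv = true ↔ ∃ x, ReachL s (q.map Prod.fst) x ∧ followed x B = true) := by
  intro n
  induction n with
  | zero => intro s q hinv h; omega
  | succ n ih =>
    intro s q hinv hlt
    match q, hinv with
    | [], _ =>
      rw [chainLoop]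
      simp only [List.map_nil, Bool.false_eq_true, false_iff]
      rintro ⟨x, hx, -⟩
      exact reachL_nil s x hx
    | (check, b) :: rest, hinv =>
      rw [chainLoop]
      by_cases hf : followed check B = true
      · simp only [hf, if_true, true_iff]
        exact ⟨check, .base check (by simp), hf⟩
      · simp only [hf, Bool.false_eq_true, if_false]
        have hmlt := chain_step_lt s check b rest hinv
        rw [ih _ _ (chain_step_inv s check b rest hinv) (by omega)]
        have hq' : ((((PySem.Set.discard s check).filter (fun y => followed check y)).map
              (fun y => (y, (PySem.Set.discard s check).length))).reverse ++ rest).map Prod.fst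
            = ((PySem.Set.discard s check).filter (fun y => followed check y)).reverse
              ++ rest.map Prod.fst := by
          rw [List.map_append, List.map_reverse, List.map_map]
          have hid : (Prod.fst ∘ fun y : Int => (y, (PySem.Set.discard s check).length))
              = fun y : Int => y := rfl
          rw [hid, List.map_id']
        rw [hq']
        constructor
        · rintro ⟨x, hx, hxB⟩
          exact ⟨x, reachA_fwd s check (rest.map Prod.fst) x hx, hxB⟩
        · rintro ⟨x, hx, hxB⟩
          rcases reachA_bwd s check (rest.map Prod.fst) x hx with rfl | hx'
          · exact absurd hxB hf
          · exact ⟨x, hx', hxB⟩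

-- B-side: what pushAll does, membership-wise
theorem pushAll_fst_contains :
    ∀ (bucket : List Int) (v : PySem.Set Int) (st : List Int) (z : Int),
    ((pushAll bucket v st).1.contains z) = (v.contains z || decide (z ∈ bucket)) := by
  intro bucket
  induction bucket with
  | nil => intro v st z; simp [pushAll]
  | cons y ys ih =>
    intro v st z
    unfold pushAll
    by_cases hc : PySem.Set.contains v y = true
    · simp only [hc, if_true]
      rw [ih]
      by_cases hzy : z = y
      · subst hzy
        have hzv : z ∈ v := by simpa using hc
        simp [List.mem_cons, hzv]
      · simp [List.mem_cons, hzy]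
    · simp only [Bool.not_eq_true] at hc
      simp only [hc, Bool.false_eq_true, if_false]
      rw [ih]
      have hadd : (PySem.Set.add v y).contains z = (v.contains z || decide (z = y)) := by
        simp only [PySem.Set.contains_eq_listContains, List.contains_eq_mem]
        by_cases hzy : z = y
        · subst hzy
          simp [(PySem.Set.mem_add v y z).mpr (Or.inr rfl)]
        · simp only [hzy, decide_false, Bool.or_false]
          by_cases hzv : z ∈ v
          · simp [hzv, (PySem.Set.mem_add v y z).mpr (Or.inl hzv)]
          · have : z ∉ PySem.Set.add v y := fun hh =>
              (((PySem.Set.mem_add v y z).mp hh).elim hzv hzy)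
            simp [hzv, this]
      rw [hadd]
      by_cases hzy : z = y
      · subst hzy
        simp [List.mem_cons]
      · simp [List.mem_cons, hzy]

theorem pushAll_snd_mem :
    ∀ (bucket : List Int) (v : PySem.Set Int) (st : List Int) (z : Int),
    z ∈ (pushAll bucket v st).2 ↔ z ∈ st ∨ (z ∈ bucket ∧ v.contains z = false) := by
  intro bucket
  induction bucket with
  | nil => intro v st z; simp [pushAll]
  | cons y ys ih =>
    intro v st z
    unfold pushAll
    by_cases hc : PySem.Set.contains v y = true
    · simp only [hc, if_true]
      rw [ih]
      constructor
      · rintro (h | ⟨h1, h2⟩)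
        · exact Or.inl h
        · exact Or.inr ⟨List.mem_cons_of_mem _ h1, h2⟩
      · rintro (h | ⟨h1, h2⟩)
        · exact Or.inl h
        · rcases List.mem_cons.mp h1 with rfl | h1
          · rw [hc] at h2; exact absurd h2 (by simp)
          · exact Or.inr ⟨h1, h2⟩
    · simp only [Bool.not_eq_true] at hc
      simp only [hc, Bool.false_eq_true, if_false]
      rw [ih]
      have haddc : ∀ w : Int, (PySem.Set.add v y).contains w = false ↔
          (v.contains w = false ∧ w ≠ y) := by
        intro w
        simp only [PySem.Set.contains_eq_listContains, List.contains_eq_mem,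
          decide_eq_false_iff_not]
        constructor
        · intro h
          refine ⟨fun hw => h ((PySem.Set.mem_add v y w).mpr (Or.inl hw)),
            fun hw => h ((PySem.Set.mem_add v y w).mpr (Or.inr hw))⟩
        · rintro ⟨h1, h2⟩ hw
          exact ((PySem.Set.mem_add v y w).mp hw).elim h1 h2
      constructor
      · rintro (h | ⟨h1, h2⟩)
        · rcases List.mem_cons.mp h with rfl | h
          · exact Or.inr ⟨List.mem_cons_self, hc⟩
          · exact Or.inl h
        · exact Or.inr ⟨List.mem_cons_of_mem _ h1, ((haddc z).mp h2).1⟩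
      · rintro (h | ⟨h1, h2⟩)
        · exact Or.inl (List.mem_cons_of_mem _ h)
        · rcases List.mem_cons.mp h1 with rfl | h1
          · exact Or.inl List.mem_cons_self
          · by_cases hzy : z = y
            · subst hzy
              exact Or.inl List.mem_cons_self
            · exact Or.inr ⟨h1, (haddc z).mpr ⟨h2, hzy⟩⟩

-- the "allowed" element list at visited-set v
def allowedL (nums : List Int) (v : PySem.Set Int) : List Int :=
  nums.filter (fun y => !PySem.Set.contains v y)

theorem mem_allowedL (nums : List Int) (v : PySem.Set Int) (z : Int) :
    z ∈ allowedL nums v ↔ z ∈ nums ∧ v.contains z = false := by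
  unfold allowedL
  rw [List.mem_filter]
  simp

theorem bucket_mem (nums : List Int) (x z : Int) :
    z ∈ (buildIndex nums).getD (PySem.Int.mod x 100) [] ↔ z ∈ nums ∧ followed x z = true := by
  rw [getD_buildIndex, List.mem_filter]
  unfold followed
  simp only [beq_iff_eq]
  constructor
  · rintro ⟨h1, h2⟩
    exact ⟨h1, h2.symm⟩
  · rintro ⟨h1, h2⟩
    exact ⟨h1, h2.symm⟩

-- B-side step lemmas
theorem reachB_fwd (nums : List Int) (x : Int) (restv : List Int)
    (v : PySem.Set Int) (z : Int)
    (h : ReachL (allowedL nums (pushAll ((buildIndex nums).getD (PySem.Int.mod x 100) []) v restv).1)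
      (pushAll ((buildIndex nums).getD (PySem.Int.mod x 100) []) v restv).2 z) :
    ReachL (allowedL nums v) (x :: restv) z := by
  set bucket := (buildIndex nums).getD (PySem.Int.mod x 100) [] with hbk
  induction h with
  | base w hw =>
    rcases (pushAll_snd_mem bucket v restv w).mp hw with hw | ⟨hw1, hw2⟩
    · exact .base w (List.mem_cons_of_mem _ hw)
    · have hb := (bucket_mem nums x w).mp hw1
      exact .step x w (.base x List.mem_cons_self)
        ((mem_allowedL nums v w).mpr ⟨hb.1, hw2⟩) hb.2
  | step a y _ hy hf ih =>
    have hy' := (mem_allowedL nums _ y).mp hy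
    have hyv : v.contains y = false := by
      have := hy'.2
      rw [pushAll_fst_contains] at this
      simp only [Bool.or_eq_false_iff] at this
      exact this.1
    exact .step a y ih ((mem_allowedL nums v y).mpr ⟨hy'.1, hyv⟩) hf

theorem reachB_bwd (nums : List Int) (x : Int) (restv : List Int)
    (v : PySem.Set Int) (z : Int)
    (h : ReachL (allowedL nums v) (x :: restv) z) :
    z = x ∨
    ReachL (allowedL nums (pushAll ((buildIndex nums).getD (PySem.Int.mod x 100) []) v restv).1)
      (pushAll ((buildIndex nums).getD (PySem.Int.mod x 100) []) v restv).2 z := by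
  set bucket := (buildIndex nums).getD (PySem.Int.mod x 100) [] with hbk
  induction h with
  | base w hw =>
    rcases List.mem_cons.mp hw with rfl | hw
    · exact Or.inl rfl
    · exact Or.inr (.base w ((pushAll_snd_mem bucket v restv w).mpr (Or.inl hw)))
  | step a y ha hy hf ih =>
    have hy' := (mem_allowedL nums v y).mp hy
    rcases ih with rfl | hra
    · -- edge from the popped x: y is in x's bucket and unvisited, so it was pushed
      have hyb : y ∈ bucket := (bucket_mem nums a y).mpr ⟨hy'.1, hf⟩
      exact Or.inr (.base y ((pushAll_snd_mem bucket v restv y).mpr (Or.inr ⟨hyb, hy'.2⟩)))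
    · right
      by_cases hyv : (pushAll bucket v restv).1.contains y = true
      · -- y became visited during the pushes: it is in the bucket and was pushed
        rw [pushAll_fst_contains] at hyv
        have hyb : y ∈ bucket := by
          rcases Bool.or_eq_true_iff.mp hyv with h1 | h1
          · rw [hy'.2] at h1; exact absurd h1 (by simp)
          · exact of_decide_eq_true h1
        exact .base y ((pushAll_snd_mem bucket v restv y).mpr (Or.inr ⟨hyb, hy'.2⟩))
      · simp only [Bool.not_eq_true] at hyv
        exact .step a y hra ((mem_allowedL nums _ y).mpr ⟨hy'.1, hyv⟩) hf

theorem altLoop_iff (target : Int) (nums : List Int)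
    (hidx : ∀ k : Int, ∀ y ∈ (buildIndex nums).getD k [], y ∈ nums) :
    ∀ (n : Nat) (v : PySem.Set Int) (st : List Int),
    st.length + 2 * unvis nums v < n →
    (altLoop target (buildIndex nums) nums hidx v st = true ↔
      ∃ x, ReachL (allowedL nums v) st x ∧ (PySem.Int.mod x 100 == target) = true) := by
  intro n
  induction n with
  | zero => intro v st h; omega
  | succ n ih =>
    intro v st hlt
    match st with
    | [] =>
      rw [altLoop]
      simp only [Bool.false_eq_true, false_iff]
      rintro ⟨x, hx, -⟩
      exact reachL_nil _ x hx
    | x :: rest =>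
      rw [altLoop]
      by_cases hf : (PySem.Int.mod x 100 == target) = true
      · simp only [hf, if_true, true_iff]
        exact ⟨x, .base x List.mem_cons_self, hf⟩
      · simp only [hf, Bool.false_eq_true, if_false]
        have hm := pushAll_measure nums ((buildIndex nums).getD (PySem.Int.mod x 100) []) v rest
          (hidx (PySem.Int.mod x 100))
        simp only [List.length_cons] at hlt
        rw [ih _ _ (by omega)]
        constructor
        · rintro ⟨z, hz, hzB⟩
          exact ⟨z, reachB_fwd nums x rest v z hz, hzB⟩
        · rintro ⟨z, hz, hzB⟩
          rcases reachB_bwd nums x rest v z hz with rfl | hz'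
          · exact absurd hzB hf
          · exact ⟨z, hz', hzB⟩

theorem allowedL_empty (nums : List Int) : allowedL nums PySem.Set.empty = nums := by
  unfold allowedL
  rw [List.filter_eq_self]
  intro y _
  rfl

theorem chainable_eq (set_of_nums : List Int) (A B : Int) :
    chainable set_of_nums A B = chainable_alt set_of_nums A B := by
  have hA := chainLoop_iff B
    (chainMeasure (PySem.Set.ofList set_of_nums) [(A, (PySem.Set.ofList set_of_nums).length + 1)] + 1)
    (PySem.Set.ofList set_of_nums) [(A, (PySem.Set.ofList set_of_nums).length + 1)]
    (by intro p hp; simp only [List.mem_singleton] at hp; subst hp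
        exact ⟨by omega, fun _ => by omega⟩)
    (by omega)
  have hB := altLoop_iff (PySem.Int.floordiv B 100) (PySem.Set.ofList set_of_nums)
    (by intro k y hy; rw [getD_buildIndex] at hy; exact (List.mem_filter.mp hy).1)
    (([A] : List Int).length + 2 * unvis (PySem.Set.ofList set_of_nums) PySem.Set.empty + 1)
    PySem.Set.empty [A] (by omega)
  rw [allowedL_empty] at hB
  simp only [List.map_cons, List.map_nil] at hA
  have : (∃ x, ReachL (PySem.Set.ofList set_of_nums) [A] x ∧ followed x B = true) ↔
      (∃ x, ReachL (PySem.Set.ofList set_of_nums) [A] x ∧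
        (PySem.Int.mod x 100 == PySem.Int.floordiv B 100) = true) := Iff.rfl
  rw [Bool.eq_iff_iff]
  unfold chainable chainable_alt
  exact (hA.trans this).trans hB.symm

-- ===== VERDICT (by name: the statement is the Claim_ definition above) =====
theorem chainable_spec : Claim_equal_chainable := by
  intro set_of_nums A B _
  unfold Spec_chainable
  exact chainable_eq set_of_nums A B
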